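-- pv_equiv track=rewrite | github.com/RissRossApplesauce/DKC3 | 2020/GeorgeGrammar.py | solve
-- ===== SOURCE A (Python) =====
-- def solve(x, n):
--     copyx = x
--     x = list(x)
--     letters = sorted([l for l in x if l.isalpha()])
--     i = 0
--     li = 0
--     while i < len(x):
--         if x[i].isalpha():
--             x[i] = letters[li]
--             li +=1
--         i += 1
--     return copyx + '\n' + ''.join(x)
-- ===== SOURCE B (Python) =====
-- ALPHA = "ABCDEFGHIJKLMNOPQRSTUVWXYZabcdefghijklmnopqrstuvwxyz"
--
-- def solve(x, n):
--     xs = list(x)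
--     letters = []
--     for c in ALPHA:
--         letters += [c] * xs.count(c)
--     it = iter(letters)
--     out = []
--     for c in xs:
--         out.append(next(it) if c.isalpha() else c)
--     return x + '\n' + ''.join(out)
-- ===== Notes on version B (the rewrite author's own statement) =====
-- stated objective: alternative
-- what changed: replaces sorted() on the extracted letters by a counting sort over the fixed 52-letter ASCII alphabet (per-letter counts, then emit each letter count-many times in alphabet order) and reinserts via an iterator instead of index-based in-place assignment
import Mathlib
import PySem

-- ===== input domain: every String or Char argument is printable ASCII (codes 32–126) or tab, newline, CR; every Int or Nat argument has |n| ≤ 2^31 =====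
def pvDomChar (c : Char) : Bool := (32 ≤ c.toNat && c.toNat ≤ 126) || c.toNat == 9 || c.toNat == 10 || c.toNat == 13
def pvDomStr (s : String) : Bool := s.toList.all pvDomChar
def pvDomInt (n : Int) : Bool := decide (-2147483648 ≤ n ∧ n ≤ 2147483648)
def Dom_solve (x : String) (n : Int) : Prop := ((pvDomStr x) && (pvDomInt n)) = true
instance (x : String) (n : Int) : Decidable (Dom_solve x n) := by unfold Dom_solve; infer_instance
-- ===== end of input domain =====

-- B replaces A's sorted() on the extracted letters by a counting sort over the fixed
-- 52-letter alphabet and reinserts them via an iterator; alternative algorithm, same return value.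

-- ===== PORT A =====
-- A's while loop: index i walks the char array, li walks the sorted letters list, and
-- alpha positions are overwritten in place.  letters[li] is ported with getD ' '; the
-- default is never read, since letters holds exactly one entry per alpha position of x.
def solveLoopA (letters : List Char) (i li : Nat) (x : List Char) : List Char :=
  if h : i < x.length then
    if PySem.Chars.isalpha x[i] then
      solveLoopA letters (i + 1) (li + 1) (x.set i (letters.getD li ' '))
    else
      solveLoopA letters (i + 1) li x
  else x
termination_by x.length - i
decreasing_by
  · simp only [List.length_set]; omega
  · omega

def solve (x : String) (n : Int) : String :=
  let copyx := x
  let xl := x.toList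
  let letters := PySem.List.sorted (xl.filter (fun l => PySem.Chars.isalpha l)) (fun l => l) false
  copyx ++ "\n" ++ String.mk (solveLoopA letters 0 0 xl)

-- ===== PORT B =====
def ALPHA : String := "ABCDEFGHIJKLMNOPQRSTUVWXYZabcdefghijklmnopqrstuvwxyz"

-- 'for c in xs: out.append(next(it) if c.isalpha() else c)': next() on the list iterator
-- is head/tail, ported with headD ' ' — the default is never read (letters is long enough).
def solveFillB (xs letters : List Char) : List Char :=
  (xs.foldl
    (fun (s : List Char × List Char) c =>
      if PySem.Chars.isalpha c then (s.1 ++ [s.2.headD ' '], s.2.tail) else (s.1 ++ [c], s.2))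
    ([], letters)).1

def solve_alt (x : String) (n : Int) : String :=
  let xs := x.toList
  let letters := ALPHA.toList.foldl
    (fun acc c => acc ++ PySem.List.pyRepeat [c] ((PySem.List.count xs c : Int))) []
  x ++ "\n" ++ String.mk (solveFillB xs letters)

-- ===== PRECONDITION & SPEC =====
def Spec_solve (x : String) (n : Int) (out : String) : Prop := out = solve_alt x n
instance (x : String) (n : Int) (out : String) : Decidable (Spec_solve x n out) := by unfold Spec_solve; infer_instance

-- ===== CLAIM (what is proved, stated in full; the proofs are below) =====
def Claim_equal_solve : Prop := ∀ (x : String) (n : Int), Dom_solve x n → Spec_solve x n (solve x n)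

-- ===== LEMMAS AND PROOFS =====

-- the common shape of both reinsertion passes
def mergeLetters : List Char → List Char → List Char
  | [], _ => []
  | c :: cs, ls =>
    if PySem.Chars.isalpha c then ls.headD ' ' :: mergeLetters cs ls.tail
    else c :: mergeLetters cs ls

theorem fillB_aux (xs : List Char) : ∀ (acc ls : List Char),
    (xs.foldl
      (fun (s : List Char × List Char) c =>
        if PySem.Chars.isalpha c then (s.1 ++ [s.2.headD ' '], s.2.tail) else (s.1 ++ [c], s.2))
      (acc, ls)).1 = acc ++ mergeLetters xs ls := by
  induction xs with
  | nil => intro acc ls; simp [mergeLetters]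
  | cons c cs ih =>
    intro acc ls
    simp only [List.foldl_cons]
    by_cases h : PySem.Chars.isalpha c = true
    · rw [if_pos h, ih]; simp [mergeLetters, h]
    · rw [if_neg h, ih]; simp [mergeLetters, h]

theorem fillB_eq (xs letters : List Char) :
    solveFillB xs letters = mergeLetters xs letters := by
  unfold solveFillB; rw [fillB_aux]; simp

theorem loopA_eq (letters : List Char) (i li : Nat) (x : List Char) :
    solveLoopA letters i li x = x.take i ++ mergeLetters (x.drop i) (letters.drop li) := by
  rw [solveLoopA]
  split
  case isTrue h =>
    have hdrop : x.drop i = x[i] :: x.drop (i + 1) := List.drop_eq_getElem_cons h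
    split
    case isTrue ha =>
      rw [loopA_eq letters (i + 1) (li + 1) (x.set i (letters.getD li ' '))]
      have hset : x.set i (letters.getD li ' ') =
          x.take i ++ letters.getD li ' ' :: x.drop (i + 1) := by
        rw [List.set_eq_take_append_cons_drop]; simp [h]
      rw [hset]
      have hlen : (x.take i).length = i := by simp; omega
      rw [List.take_append, List.drop_append, hlen]
      have hle : (x.take i).length ≤ i + 1 := by rw [hlen]; omega
      rw [List.take_of_length_le hle, hdrop]
      have hnil : List.drop (i + 1) (x.take i) = [] := List.drop_eq_nil_of_le (by rw [hlen]; omega)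
      rw [hnil]
      simp [mergeLetters, ha, List.getD_eq_getElem?_getD, List.head?_drop, List.tail_drop]
    case isFalse ha =>
      rw [loopA_eq letters (i + 1) li x, hdrop]
      have ht : List.take (i + 1) x = List.take i x ++ [x[i]] := by
        rw [List.take_add_one, List.getElem?_eq_getElem h]; rfl
      rw [ht, List.append_assoc, List.singleton_append]
      conv_rhs => rw [mergeLetters]
      rw [if_neg ha]
  case isFalse h =>
    have h1 : x.length ≤ i := Nat.le_of_not_lt h
    simp [List.take_of_length_le h1, List.drop_eq_nil_of_le h1, mergeLetters]
termination_by x.length - i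
decreasing_by
  · omega
  · simp only [List.length_set]; omega

theorem alpha_list_eq : ALPHA.toList = (List.range' 65 26 ++ List.range' 97 26).map Char.ofNat := by
  decide

theorem char_toNat_le (a b : Char) (h : a ≤ b) : a.toNat ≤ b.toNat :=
  UInt32.le_iff_toNat_le.mp (Char.le_def.mp h)

theorem alpha_mem (c : Char) (h : PySem.Chars.isalpha c = true) : c ∈ ALPHA.toList := by
  rw [alpha_list_eq]
  have h' : ('A' ≤ c ∧ c ≤ 'Z') ∨ ('a' ≤ c ∧ c ≤ 'z') := by
    simpa [PySem.Chars.isalpha, PySem.Chars.isupper, PySem.Chars.islower,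
      Bool.or_eq_true, Bool.and_eq_true, decide_eq_true_iff] using h
  have hb : (65 ≤ c.toNat ∧ c.toNat ≤ 90) ∨ (97 ≤ c.toNat ∧ c.toNat ≤ 122) := by
    rcases h' with ⟨h1, h2⟩ | ⟨h1, h2⟩
    · exact Or.inl ⟨char_toNat_le _ _ h1, char_toNat_le _ _ h2⟩
    · exact Or.inr ⟨char_toNat_le _ _ h1, char_toNat_le _ _ h2⟩
  refine List.mem_map.2 ⟨c.toNat, ?_, Char.ofNat_toNat c⟩
  rcases hb with ⟨h1, h2⟩ | ⟨h1, h2⟩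
  · exact List.mem_append_left _ (List.mem_range'.2 ⟨c.toNat - 65, by omega, by omega⟩)
  · exact List.mem_append_right _ (List.mem_range'.2 ⟨c.toNat - 97, by omega, by omega⟩)

theorem perm_flatMap_replicate (A : List Char) (hA : A.Nodup) :
    ∀ (L : List Char), (∀ c ∈ L, c ∈ A) →
    L.Perm (A.flatMap fun c => List.replicate (L.count c) c) := by
  induction A with
  | nil =>
    intro L hsub
    have : L = [] := by
      cases L with
      | nil => rfl
      | cons b bs => exact absurd (hsub b (by simp)) (by simp)
    simp [this]
  | cons a A' ih =>
    intro L hsub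
    have hA' : A'.Nodup := hA.tail
    have hL : L.Perm (L.filter (· == a) ++ L.filter (fun x => !(x == a))) :=
      (List.filter_append_perm _ L).symm
    have h1 : L.filter (· == a) = List.replicate (L.count a) a := List.filter_beq a
    have hsub' : ∀ c ∈ L.filter (fun x => !(x == a)), c ∈ A' := by
      intro c hc
      have hm := List.mem_filter.1 hc
      have hne : ¬(c == a) = true := by simpa using hm.2
      rcases List.mem_cons.1 (hsub c hm.1) with hceq | hmem
      · exact absurd (by simp [hceq]) hne
      · exact hmem
    have ih' := ih hA' (L.filter (fun x => !(x == a))) hsub'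
    have hcnt : ∀ c ∈ A', (L.filter (fun x => !(x == a))).count c = L.count c := by
      intro c hc
      apply List.count_filter
      have hca : c ≠ a := by
        intro hceq; subst hceq
        exact (List.nodup_cons.1 hA).1 hc
      simp [hca]
    have hflat : (A'.flatMap fun c => List.replicate ((L.filter (fun x => !(x == a))).count c) c)
        = A'.flatMap fun c => List.replicate (L.count c) c :=
      List.flatMap_congr (fun c hc => by rw [hcnt c hc])
    rw [hflat] at ih'
    have hmain := hL.trans (List.Perm.append_left (L.filter (· == a)) ih')
    rw [h1] at hmain
    simpa [List.flatMap_cons] using hmain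

theorem pairwise_flatMap_replicate (A : List Char) (hA : A.Pairwise (· < ·)) (f : Char → Nat) :
    (A.flatMap fun c => List.replicate (f c) c).Pairwise (· ≤ ·) := by
  induction A with
  | nil => simp
  | cons a A' ih =>
    simp only [List.flatMap_cons]
    apply List.pairwise_append.2
    refine ⟨List.pairwise_replicate.2 (Or.inr (le_refl a)), ih hA.tail, ?_⟩
    intro x hx y hy
    have hxa : x = a := List.eq_of_mem_replicate hx
    rcases List.mem_flatMap.1 hy with ⟨c, hc, hyc⟩
    have hyc' : y = c := List.eq_of_mem_replicate hyc
    subst hxa; subst hyc'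
    exact le_of_lt ((List.pairwise_cons.1 hA).1 y hc)

theorem alpha_nodup : ALPHA.toList.Nodup := by decide

theorem alpha_sorted : ALPHA.toList.Pairwise (· < ·) := by decide

theorem alpha_all_alpha : ∀ c ∈ ALPHA.toList, PySem.Chars.isalpha c = true := by
  have h : ALPHA.toList.all PySem.Chars.isalpha = true := by rfl
  simpa [List.all_eq_true] using h

theorem letters_eq (xs : List Char) :
    PySem.List.sorted (xs.filter (fun l => PySem.Chars.isalpha l)) (fun l => l) false
      = ALPHA.toList.foldl
          (fun acc c => acc ++ PySem.List.pyRepeat [c] ((PySem.List.count xs c : Int))) [] := by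
  set L := xs.filter (fun l => PySem.Chars.isalpha l) with hLdef
  rw [PySem.List.foldl_append_eq_flatMap, List.nil_append]
  have hrepl : (ALPHA.toList.flatMap fun c => PySem.List.pyRepeat [c] ((PySem.List.count xs c : Int)))
      = ALPHA.toList.flatMap fun c => List.replicate (L.count c) c := by
    apply List.flatMap_congr
    intro c hc
    rw [PySem.List.pyRepeat_singleton]
    have : PySem.List.count xs c = L.count c := by
      rw [hLdef]
      unfold PySem.List.count
      exact (List.count_filter (alpha_all_alpha c hc)).symm
    rw [Int.toNat_natCast, this]
  rw [hrepl]
  apply PySem.List.sorted_id_eq_of_perm_of_pairwise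
  · exact (perm_flatMap_replicate ALPHA.toList alpha_nodup L
      (fun c hcL => alpha_mem c (List.mem_filter.1 (hLdef ▸ hcL)).2)).symm
  · exact pairwise_flatMap_replicate ALPHA.toList alpha_sorted (fun c => L.count c)

-- ===== VERDICT (by name: the statement is the Claim_ definition above) =====
theorem solve_spec : Claim_equal_solve := by
  intro x n _
  unfold Spec_solve solve solve_alt
  simp only
  rw [letters_eq, loopA_eq, fillB_eq]
  simp
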